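-- pv_equiv track=rewrite | github.com/guesar2/steane_error_correction | generate_ghz_circuits.py | find_errors_fast
-- ===== SOURCE A (Python) =====
-- def generate_fixed_weight(N, k):
--     """
--     Yield all integers < 2^N with exactly k bits set.
--
--     Args:
--         N (int): Number of bits.
--         k (int): Number of bits set (weight).
--
--     Yields:
--         int: Integer with k bits set.
--     """
--     if k == 0:
--         yield 0
--         return
--     x = (1 << k) - 1  # smallest k-bit number
--     limit = 1 << N
--     while x < limit:
--         yield x
--         # Gosper's hack: next with same popcount
--         c = x & -x
--         r = x + c
--         x = (((r ^ x) >> 2) // c) | r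
--
-- def find_errors_fast(n_qubits):
--     """
--     Efficiently find all error masks with weight up to max_weight for n_qubits.
--
--     Args:
--         n_qubits (int): Number of qubits in the GHZ state.
--
--     Returns:
--         List[int]: List of error masks with valid weights.
--     """
--     max_weight = (n_qubits - 1) // 2 - 1
--     n_bits = 2 * n_qubits
--
--     errors = []
--     # For each possible error weight, generate all error masks of that weight
--     for weight in range(1, max_weight + 1):
--         for error_mask in generate_fixed_weight(n_bits, weight):
--             mask_errors = []
--             bottom = error_mask & ((1 << (n_qubits + 1)) - 1)
--             mask_errors.append(bottom)
--             top = error_mask >> (n_qubits + 1)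
--             # For each CNOT, expand error mask to account for possible error locations
--             for i in range(n_qubits - 1):
--                 if (top >> i) & 1:
--                     new_errors = []
--                     for e in mask_errors:
--                         for j in range(3):
--                             err = e | ((j + 1) << (n_qubits + 1 + 2 * i))
--                             new_errors.append(err)
--                     mask_errors = new_errors
--             errors += mask_errors
--     return errors
-- ===== SOURCE B (Python) =====
-- def generate_fixed_weight(N, k):
--     """Yield all integers < 2^N with exactly k bits set."""
--     if k == 0:
--         yield 0
--         return
--     x = (1 << k) - 1  # smallest k-bit number
--     limit = 1 << N
--     while x < limit:
--         yield x
--         # Gosper's hack: next with same popcount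
--         c = x & -x
--         r = x + c
--         x = (((r ^ x) >> 2) // c) | r
--
-- def _expand(base, positions, shift):
--     """All ways of stamping a code 1..3 at each CNOT position onto base
--     (recursive Cartesian product; first position varies slowest)."""
--     if not positions:
--         return [base]
--     return [e | (j << (shift + 2 * positions[0]))
--             for j in (1, 2, 3)
--             for e in _expand(base, positions[1:], shift)]
--
-- def find_errors_fast(n_qubits):
--     """Declarative rewrite: one nested comprehension; each mask's expansion over its
--     set CNOT positions is a recursive Cartesian product instead of A's in-place
--     list-tripling loop."""
--     low = n_qubits + 1
--     return [err
--             for weight in range(1, (n_qubits - 1) // 2)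
--             for mask in generate_fixed_weight(2 * n_qubits, weight)
--             for err in _expand(mask & ((1 << low) - 1),
--                                [i for i in range(n_qubits - 1) if (mask >> (low + i)) & 1],
--                                low)]
-- ===== Notes on version B (the rewrite author's own statement) =====
-- stated objective: alternative
-- what changed: B is one declarative nested comprehension over weights/masks, and each mask's expansion over its set CNOT positions is a recursive Cartesian product (helper _expand) instead of A's imperative loop that repeatedly rebuilds and triples an intermediate list.
import Mathlib
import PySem

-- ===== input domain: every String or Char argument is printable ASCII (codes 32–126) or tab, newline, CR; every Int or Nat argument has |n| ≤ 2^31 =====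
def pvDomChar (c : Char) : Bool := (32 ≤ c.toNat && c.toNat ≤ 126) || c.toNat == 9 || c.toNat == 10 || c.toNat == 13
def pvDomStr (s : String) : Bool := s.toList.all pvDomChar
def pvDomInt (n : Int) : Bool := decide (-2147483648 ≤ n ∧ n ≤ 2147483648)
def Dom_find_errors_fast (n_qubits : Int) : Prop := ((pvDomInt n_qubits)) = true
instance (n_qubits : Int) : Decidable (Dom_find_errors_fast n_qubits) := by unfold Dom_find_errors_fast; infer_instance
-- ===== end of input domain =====

-- B is a declarative nested comprehension; each mask's expansion is a recursive
-- Cartesian product instead of A's imperative list-tripling loop (objective: alternative).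

-- ===== PORT A =====
-- generate_fixed_weight is identical in A and in B; it is ported once and used by both ports.
def gosperNext (x : Int) : Int :=
  let c := PySem.Int.band x (-x)
  let r := x + c
  PySem.Int.bor (PySem.Int.floordiv ((PySem.Int.bxor r x) >>> 2) c) r

-- Python's 'while x < limit' loop; x strictly increases each step, so 'limit' iterations
-- of fuel always suffice and the port yields exactly the Python generator's values.
def gfwLoop (limit : Int) : Nat → Int → List Int
  | 0, _ => []
  | fuel+1, x => if x < limit then x :: gfwLoop limit fuel (gosperNext x) else []

def generate_fixed_weight (N k : Int) : List Int :=
  if k = 0 then [0]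
  else
    let x := ((1 : Int) <<< k.toNat) - 1
    let limit := (1 : Int) <<< N.toNat
    gfwLoop limit limit.toNat x

def find_errors_fast (n_qubits : Int) : List Int :=
  let max_weight := PySem.Int.floordiv (n_qubits - 1) 2 - 1
  let n_bits := 2 * n_qubits
  (PySem.List.pyRange 1 (max_weight + 1) 1).foldl (fun (errors : List Int) (weight : Int) =>
    (generate_fixed_weight n_bits weight).foldl (fun errors error_mask =>
      let bottom := PySem.Int.band error_mask (((1 : Int) <<< (n_qubits + 1).toNat) - 1)
      let top := error_mask >>> (n_qubits + 1).toNat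
      let mask_errors := (PySem.List.pyRange 0 (n_qubits - 1) 1).foldl (fun ms i =>
        if PySem.Int.band (top >>> i.toNat) 1 != 0 then
          ms.flatMap (fun e => (PySem.List.pyRange 0 3 1).map (fun (j : Int) =>
            PySem.Int.bor e ((j + 1) <<< (n_qubits + 1 + 2 * i).toNat)))
        else ms) [bottom]
      errors ++ mask_errors) errors) []

-- ===== PORT B =====
-- '*init, last = positions' + comprehension over _expand(base, init) × (1,2,3)
def pvExpand (shift base : Int) : List Int → List Int
  | [] => [base]
  | p :: rest =>
      (pvExpand shift base (p :: rest).dropLast).flatMap (fun e =>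
        ([1, 2, 3] : List Int).map (fun (j : Int) =>
          PySem.Int.bor e (j <<< (shift + 2 * (p :: rest).getLast (List.cons_ne_nil p rest)).toNat)))
termination_by ps => ps.length
decreasing_by simp

def find_errors_fast_alt (n_qubits : Int) : List Int :=
  let low := n_qubits + 1
  (PySem.List.pyRange 1 (PySem.Int.floordiv (n_qubits - 1) 2) 1).flatMap (fun weight =>
    (generate_fixed_weight (2 * n_qubits) weight).flatMap (fun mask =>
      pvExpand low (PySem.Int.band mask (((1 : Int) <<< low.toNat) - 1))
        ((PySem.List.pyRange 0 (n_qubits - 1) 1).filter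
          (fun i => PySem.Int.band (mask >>> (low + i).toNat) 1 != 0))))

-- ===== PRECONDITION & SPEC =====
def Spec_find_errors_fast (n_qubits : Int) (out : List Int) : Prop := out = find_errors_fast_alt n_qubits
instance (n_qubits : Int) (out : List Int) : Decidable (Spec_find_errors_fast n_qubits out) := by unfold Spec_find_errors_fast; infer_instance

-- ===== CLAIM (what is proved, stated in full; the proofs are below) =====
def Claim_equal_find_errors_fast : Prop := ∀ (n_qubits : Int), Dom_find_errors_fast n_qubits → Spec_find_errors_fast n_qubits (find_errors_fast n_qubits)

-- ===== LEMMAS AND PROOFS =====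

-- a conditional fold is the unconditional fold over the filtered list
theorem pv_foldl_if_filter {α β : Type} (p : α → Bool) (g : β → α → β) :
    ∀ (xs : List α) (L : β),
      xs.foldl (fun s i => if p i then g s i else s) L = (xs.filter p).foldl g L := by
  intro xs
  induction xs with
  | nil => intro L; rfl
  | cons x xs ih =>
    intro L
    by_cases h : p x = true
    · simp [h, ih]
    · simp only [Bool.not_eq_true] at h
      simp [h, ih]

-- unfolding pvExpand at a snoc
theorem pvExpand_concat (shift base q : Int) (ps : List Int) :
    pvExpand shift base (ps ++ [q])
      = (pvExpand shift base ps).flatMap (fun e =>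
          ([1, 2, 3] : List Int).map (fun (j : Int) =>
            PySem.Int.bor e (j <<< (shift + 2 * q).toNat))) := by
  rcases hps : ps ++ [q] with _ | ⟨p, rest⟩
  · simp at hps
  · have hd : (p :: rest).dropLast = ps := by rw [← hps]; exact List.dropLast_concat
    have hl : (p :: rest).getLast (List.cons_ne_nil p rest) = q := by
      have h2 : (p :: rest).getLast? = some q := by rw [← hps]; simp
      rwa [List.getLast?_eq_some_getLast (List.cons_ne_nil p rest), Option.some_inj] at h2
    rw [pvExpand, hl, hd]

-- A's list-tripling fold over the set positions equals B's recursive Cartesian product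
theorem pv_fold_expand (shift b : Int) (ps : List Int) :
    ps.foldl (fun ms i =>
        ms.flatMap (fun e => (PySem.List.pyRange 0 3 1).map (fun (j : Int) =>
          PySem.Int.bor e ((j + 1) <<< (shift + 2 * i).toNat)))) [b]
      = pvExpand shift b ps := by
  induction ps using List.reverseRecOn with
  | nil => simp [pvExpand]
  | append_singleton ps q ih =>
    rw [List.foldl_append, List.foldl_cons, List.foldl_nil, ih, pvExpand_concat]
    apply List.flatMap_congr
    intro e _
    have h3 : PySem.List.pyRange 0 3 1 = [0, 1, 2] := by decide
    rw [h3]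
    norm_num

-- the per-mask body of A equals the per-mask body of B
theorem pv_body_eq (nq mask : Int) :
    (PySem.List.pyRange 0 (nq - 1) 1).foldl (fun ms i =>
        if PySem.Int.band ((mask >>> (nq + 1).toNat) >>> i.toNat) 1 != 0 then
          ms.flatMap (fun e => (PySem.List.pyRange 0 3 1).map (fun (j : Int) =>
            PySem.Int.bor e ((j + 1) <<< (nq + 1 + 2 * i).toNat)))
        else ms) [PySem.Int.band mask (((1 : Int) <<< (nq + 1).toNat) - 1)]
      = pvExpand (nq + 1) (PySem.Int.band mask (((1 : Int) <<< (nq + 1).toNat) - 1))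
          ((PySem.List.pyRange 0 (nq - 1) 1).filter
            (fun i => PySem.Int.band (mask >>> (nq + 1 + i).toNat) 1 != 0)) := by
  rw [pv_foldl_if_filter, pv_fold_expand]
  congr 1
  apply List.filter_congr
  intro i hi
  rw [PySem.List.mem_pyRange_one] at hi
  have h1 : (nq + 1 + i).toNat = (nq + 1).toNat + i.toNat := by omega
  rw [Int.shiftRight_natCast_right, ← Int.shiftRight_add, ← h1]

-- ===== VERDICT (by name: the statement is the Claim_ definition above) =====
theorem find_errors_fast_spec : Claim_equal_find_errors_fast := by
  intro nq _
  show find_errors_fast nq = find_errors_fast_alt nq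
  simp only [find_errors_fast, find_errors_fast_alt]
  have hw : PySem.Int.floordiv (nq - 1) 2 - 1 + 1 = PySem.Int.floordiv (nq - 1) 2 := by ring
  rw [hw]
  have hinner : ∀ (errors : List Int) (weight : Int),
      (generate_fixed_weight (2 * nq) weight).foldl (fun (errors : List Int) (mask : Int) =>
        errors ++ (PySem.List.pyRange 0 (nq - 1) 1).foldl (fun ms i =>
          if PySem.Int.band ((mask >>> (nq + 1).toNat) >>> i.toNat) 1 != 0 then
            ms.flatMap (fun e => (PySem.List.pyRange 0 3 1).map (fun (j : Int) =>
              PySem.Int.bor e ((j + 1) <<< (nq + 1 + 2 * i).toNat)))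
          else ms) [PySem.Int.band mask (((1 : Int) <<< (nq + 1).toNat) - 1)]) errors
      = errors ++ (generate_fixed_weight (2 * nq) weight).flatMap (fun mask =>
          pvExpand (nq + 1) (PySem.Int.band mask (((1 : Int) <<< (nq + 1).toNat) - 1))
            ((PySem.List.pyRange 0 (nq - 1) 1).filter
              (fun i => PySem.Int.band (mask >>> (nq + 1 + i).toNat) 1 != 0))) := by
    intro errors weight
    rw [← PySem.List.foldl_append_eq_flatMap]
    congr 1
    funext errors mask
    rw [pv_body_eq]
  calc (PySem.List.pyRange 1 (PySem.Int.floordiv (nq - 1) 2) 1).foldl _ []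
      = (PySem.List.pyRange 1 (PySem.Int.floordiv (nq - 1) 2) 1).foldl (fun (errors : List Int) (weight : Int) =>
          errors ++ (generate_fixed_weight (2 * nq) weight).flatMap (fun mask =>
            pvExpand (nq + 1) (PySem.Int.band mask (((1 : Int) <<< (nq + 1).toNat) - 1))
              ((PySem.List.pyRange 0 (nq - 1) 1).filter
                (fun i => PySem.Int.band (mask >>> (nq + 1 + i).toNat) 1 != 0)))) [] := by
        exact congrArg (fun F => List.foldl F ([] : List Int) _) (funext fun e => funext fun w => hinner e w)
    _ = _ := by rw [PySem.List.foldl_append_eq_flatMap]; rfl
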